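-- pv_equiv track=rewrite | github.com/seanshnkim/hophacks-2025 | backend/learning_blocks.py | _extract_tool_error
-- ===== SOURCE A (Python) =====
-- from typing import List, Dict, Any, Optional
--
-- def _extract_tool_error(content: str) -> Optional[str]:
--     """Extract error information from tool results in content"""
--     if "Tool Results:" in content:
--         tool_section = content.split("Tool Results:")[1]
--         if "Error generating video:" in tool_section:
--             # Extract the error from the tool result
--             lines = tool_section.strip().split('\n')
--             for line in lines:
--                 if "Error generating video:" in line:
--                     # Extract error from line like "Error generating video: [error message]"
--                     error = line.split("Error generating video:")[1].strip()
--                     return error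
--     return None
-- ===== SOURCE B (Python) =====
-- from typing import Optional
--
-- def _extract_tool_error(content: str) -> Optional[str]:
--     """Extract error information from tool results in content"""
--     parts = content.split("Tool Results:")
--     if len(parts) < 2:
--         return None
--     chunks = parts[1].split("Error generating video:")
--     if len(chunks) < 2:
--         return None
--     return chunks[1].split('\n')[0].strip()
-- ===== Notes on version B (the rewrite author's own statement) =====
-- stated objective: simpler
-- what changed: B replaces A's strip + per-line loop with a membership-free chain of three splits (by 'Tool Results:', by 'Error generating video:', by newline) guarded by part counts, extracting the error by direct indexing with no loop over lines.
import Mathlib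
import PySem

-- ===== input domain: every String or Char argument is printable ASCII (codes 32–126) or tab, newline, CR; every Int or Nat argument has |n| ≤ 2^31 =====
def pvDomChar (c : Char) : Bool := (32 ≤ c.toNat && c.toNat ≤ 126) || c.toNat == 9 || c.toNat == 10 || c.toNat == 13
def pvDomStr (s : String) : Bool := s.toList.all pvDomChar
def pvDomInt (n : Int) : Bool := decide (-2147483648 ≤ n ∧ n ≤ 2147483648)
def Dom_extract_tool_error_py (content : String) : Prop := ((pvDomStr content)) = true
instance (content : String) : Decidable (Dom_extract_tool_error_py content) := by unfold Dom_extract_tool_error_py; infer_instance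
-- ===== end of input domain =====

-- B replaces A's strip + per-line scan by a chain of three splits with direct indexing (objective: simpler); return values proved equal on all inputs.

-- ===== PORT A =====
-- the 'for line in lines: if "Error generating video:" in line: return …' loop
def pyLoop (lines : List String) : Option String :=
  match lines with
  | [] => none
  | line :: rest =>
    if PySem.Str.isIn "Error generating video:" line then
      -- line.split("Error generating video:")[1].strip(); index 1 exists since the marker is in the line
      some (PySem.Str.strip (((PySem.Str.split? line "Error generating video:").getD []).getD 1 ""))
    else pyLoop rest

def extract_tool_error_py (content : String) : Option String :=
  if PySem.Str.isIn "Tool Results:" content then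
    -- content.split("Tool Results:")[1]; index 1 exists since the guard holds
    let tool_section := ((PySem.Str.split? content "Tool Results:").getD []).getD 1 ""
    if PySem.Str.isIn "Error generating video:" tool_section then
      pyLoop ((PySem.Str.split? (PySem.Str.strip tool_section) "\n").getD [])
    else none
  else none

-- ===== PORT B =====
def extract_tool_error_py_alt (content : String) : Option String :=
  let parts := (PySem.Str.split? content "Tool Results:").getD []
  if parts.length < 2 then none
  else
    let chunks := (PySem.Str.split? (parts.getD 1 "") "Error generating video:").getD []
    if chunks.length < 2 then none
    else some (PySem.Str.strip (((PySem.Str.split? (chunks.getD 1 "") "\n").getD []).getD 0 ""))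

-- ===== PRECONDITION & SPEC =====
def Spec_extract_tool_error_py (content : String) (out : Option String) : Prop := out = extract_tool_error_py_alt content
instance (content : String) (out : Option String) : Decidable (Spec_extract_tool_error_py content out) := by unfold Spec_extract_tool_error_py; infer_instance

-- ===== CLAIM (what is proved, stated in full; the proofs are below) =====
def Claim_equal_extract_tool_error_py : Prop := ∀ (content : String), Dom_extract_tool_error_py content → Spec_extract_tool_error_py content (extract_tool_error_py content)

-- ===== LEMMAS AND PROOFS =====

def TRl : List Char := "Tool Results:".toList
def EMl : List Char := "Error generating video:".toList
def NLl : List Char := ['\n']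

-- reference model of Chars.splitOn (sep ≠ [])
def sp (sep : List Char) : List Char → List (List Char)
  | [] => [[]]
  | c :: r =>
    if h : sep.isPrefixOf (c :: r) ∧ sep ≠ [] then
      [] :: sp sep (List.drop sep.length (c :: r))
    else
      (sp sep r).modifyHead (c :: ·)
  termination_by l => l.length
  decreasing_by
    · have hlen : 0 < sep.length := List.length_pos_iff.mpr h.2
      simp only [List.length_drop, List.length_cons]; omega
    · simp

-- the piece of l before the first occurrence of sep (l itself if none)
def before (sep : List Char) : List Char → List Char
  | [] => []
  | c :: r => if sep.isPrefixOf (c :: r) then [] else c :: before sep r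

def loopC : List (List Char) → Option (List Char)
  | [] => none
  | h :: t =>
    if PySem.Chars.isIn EMl h then
      some (PySem.Chars.strip ((PySem.Chars.splitOn h EMl).getD 1 []))
    else loopC t

-- canonical value both programs compute
def canon : List Char → Option (List Char)
  | [] => none
  | c :: r =>
    if EMl.isPrefixOf (c :: r) then
      some (PySem.Chars.strip (before NLl (before EMl (List.drop EMl.length (c :: r)))))
    else canon r

lemma TR_ne : TRl ≠ [] := by decide
lemma EM_ne : EMl ≠ [] := by decide
lemma NL_ne : NLl ≠ [] := by decide
lemma newline_not_mem_EMl : '\n' ∉ EMl := by decide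

lemma prefix_false {sep l : List Char} (h : ¬ sep <+: l) : sep.isPrefixOf l = false :=
  Bool.eq_false_iff.mpr (fun ht => h (List.isPrefixOf_iff_prefix.mp ht))

lemma bool_false_of_not {b : Bool} (h : ¬ b = true) : b = false := Bool.eq_false_iff.mpr h

lemma sp_nil (sep : List Char) : sp sep [] = [[]] := by rw [sp]

lemma sp_pos {sep : List Char} (hs : sep ≠ []) {c : Char} {r : List Char}
    (hp : sep.isPrefixOf (c :: r) = true) :
    sp sep (c :: r) = [] :: sp sep (List.drop sep.length (c :: r)) := by
  rw [sp]; simp [hp, hs]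

lemma sp_neg {sep : List Char} {c : Char} {r : List Char}
    (hp : sep.isPrefixOf (c :: r) = false) :
    sp sep (c :: r) = (sp sep r).modifyHead (c :: ·) := by
  rw [sp]; simp [hp]

lemma sp_ne_nil (sep l : List Char) : sp sep l ≠ [] := by
  induction l using sp.induct sep with
  | case1 => rw [sp_nil]; simp
  | case2 c r h ih =>
    rw [sp_pos h.2 h.1]; simp
  | case3 c r h ih =>
    rw [sp]; simp only [h, dite_false]
    cases hsp : sp sep r with
    | nil => exact absurd hsp ih
    | cons a t => simp [List.modifyHead]

lemma before_cons (sep : List Char) (c : Char) (r : List Char) :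
    before sep (c :: r) = if sep.isPrefixOf (c :: r) then [] else c :: before sep r := rfl

lemma sp_headI {sep : List Char} (hs : sep ≠ []) (l : List Char) :
    (sp sep l).headI = before sep l := by
  induction l using sp.induct sep with
  | case1 => rw [sp_nil]; rfl
  | case2 c r h ih => rw [sp_pos h.2 h.1, before_cons, h.1]; rfl
  | case3 c r h ih =>
    have hp : sep.isPrefixOf (c :: r) = false := bool_false_of_not (fun h' => h ⟨h', hs⟩)
    rw [sp_neg hp, before_cons, hp]
    simp only [Bool.false_eq_true, if_false]
    cases hsp : sp sep r with
    | nil => exact absurd hsp (sp_ne_nil sep r)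
    | cons a t => rw [hsp] at ih; simpa using ih

lemma sp_getD0 {sep : List Char} (hs : sep ≠ []) (l : List Char) :
    (sp sep l).getD 0 [] = before sep l := by
  have h := sp_headI hs l
  cases hsp : sp sep l with
  | nil => exact absurd hsp (sp_ne_nil sep l)
  | cons a t => rw [hsp] at h; simpa using h

lemma go_eq {sep : List Char} (hs : sep ≠ []) :
    ∀ (fuel : Nat) (l cur : List Char) (acc : List (List Char)), l.length < fuel →
      PySem.Chars.splitOn.go sep fuel l cur acc
        = acc.reverse ++ (sp sep l).modifyHead (cur.reverse ++ ·) := by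
  intro fuel
  induction fuel with
  | zero => intro l cur acc h; omega
  | succ fuel ih =>
    intro l cur acc h
    cases l with
    | nil =>
      show (cur.reverse :: acc).reverse = _
      rw [sp_nil]; simp [List.modifyHead]
    | cons c rest =>
      show (if sep.isPrefixOf (c :: rest) then
              PySem.Chars.splitOn.go sep fuel (List.drop sep.length (c :: rest)) [] (cur.reverse :: acc)
            else PySem.Chars.splitOn.go sep fuel rest (c :: cur) acc) = _
      by_cases hp : sep.isPrefixOf (c :: rest)
      · rw [if_pos hp]
        have hlen : 0 < sep.length := List.length_pos_iff.mpr hs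
        have hdrop : (List.drop sep.length (c :: rest)).length < fuel := by
          simp only [List.length_drop, List.length_cons]
          simp only [List.length_cons] at h; omega
        rw [ih _ _ _ hdrop, sp_pos hs hp]
        cases hsp : sp sep (List.drop sep.length (c :: rest)) with
        | nil => exact absurd hsp (sp_ne_nil sep _)
        | cons a t => simp [List.modifyHead]
      · rw [if_neg hp]
        have hrest : rest.length < fuel := by simp only [List.length_cons] at h; omega
        rw [ih _ _ _ hrest, sp_neg (bool_false_of_not hp)]
        cases hsp : sp sep rest with
        | nil => exact absurd hsp (sp_ne_nil sep _)
        | cons a t => simp [List.modifyHead]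

lemma splitOn_eq_sp {sep : List Char} (hs : sep ≠ []) (l : List Char) :
    PySem.Chars.splitOn l sep = sp sep l := by
  show PySem.Chars.splitOn.go sep (l.length + 1) l [] [] = _
  rw [go_eq hs (l.length + 1) l [] [] (by omega)]
  cases hsp : sp sep l with
  | nil => exact absurd hsp (sp_ne_nil sep l)
  | cons a t => simp [List.modifyHead]

lemma sp_two_le_iff {sep : List Char} (hs : sep ≠ []) (l : List Char) :
    2 ≤ (sp sep l).length ↔ sep <:+: l := by
  induction l using sp.induct sep with
  | case1 =>
    rw [sp_nil]; simp [List.infix_nil, hs]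
  | case2 c r h ih =>
    rw [sp_pos h.2 h.1]
    have h1 : 0 < (sp sep (List.drop sep.length (c :: r))).length :=
      List.length_pos_iff.mpr (sp_ne_nil sep _)
    have h2 : sep <:+: c :: r :=
      (List.isPrefixOf_iff_prefix.mp h.1).isInfix
    simp only [List.length_cons]
    constructor
    · intro _; exact h2
    · intro _; omega
  | case3 c r h ih =>
    have hp : sep.isPrefixOf (c :: r) = false := bool_false_of_not (fun h' => h ⟨h', hs⟩)
    rw [sp_neg hp, List.length_modifyHead, ih, List.infix_cons_iff]
    have hnp : ¬ sep <+: (c :: r) := fun hcon =>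
      by rw [List.isPrefixOf_iff_prefix.mpr hcon] at hp; exact Bool.true_eq_false.mp hp
    tauto

lemma getD1_modifyHead (f : List Char → List Char) (xs : List (List Char)) :
    (xs.modifyHead f).getD 1 [] = xs.getD 1 [] := by
  cases xs <;> rfl

lemma sp_getD1_pos {sep : List Char} (hs : sep ≠ []) {l : List Char} (hp : sep <+: l) :
    (sp sep l).getD 1 [] = before sep (List.drop sep.length l) := by
  cases l with
  | nil =>
    exact absurd (List.prefix_nil.mp hp) hs
  | cons c r =>
    rw [sp_pos hs (List.isPrefixOf_iff_prefix.mpr hp)]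
    simpa using sp_getD0 hs (List.drop sep.length (c :: r))

lemma sp_getD1_neg {sep : List Char} {c : Char} {r : List Char}
    (hp : sep.isPrefixOf (c :: r) = false) :
    (sp sep (c :: r)).getD 1 [] = (sp sep r).getD 1 [] := by
  rw [sp_neg hp, getD1_modifyHead]

lemma before_prefix (sep l : List Char) : before sep l <+: l := by
  induction l with
  | nil => exact List.prefix_refl _
  | cons c r ih =>
    rw [before_cons]
    by_cases hp : sep.isPrefixOf (c :: r)
    · simp [hp]
    · simp only [hp, if_false]
      exact List.cons_prefix_cons.mpr ⟨rfl, ih⟩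

lemma NL_prefix_iff (c : Char) (r : List Char) :
    NLl.isPrefixOf (c :: r) = ('\n' == c) := by
  simp [NLl, List.isPrefixOf]

lemma before_NL_append {a : List Char} (h : '\n' ∉ a) (r : List Char) :
    before NLl (a ++ r) = a ++ before NLl r := by
  induction a with
  | nil => rfl
  | cons x a' ih =>
    have hx : x ≠ '\n' := fun hc => h (by simp [hc])
    have ih' := ih (fun hc => h (List.mem_cons_of_mem _ hc))
    rw [List.cons_append, before_cons, NL_prefix_iff]
    simp [Ne.symm hx, ih']

lemma prefix_before_NL {a l : List Char} (ha : '\n' ∉ a) (h : a <+: l) :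
    a <+: before NLl l := by
  obtain ⟨t, ht⟩ := h
  rw [← ht, before_NL_append ha]
  exact List.prefix_append a _

lemma head_ne_newline {c : Char} {r : List Char} (h : EMl <+: (c :: r)) : c ≠ '\n' := by
  intro hc
  obtain ⟨t, ht⟩ := h
  have hE : EMl = 'E' :: "rror generating video:".toList := by decide
  rw [hE] at ht
  simp only [List.cons_append, List.cons.injEq] at ht
  rw [← ht.1] at hc
  exact absurd hc (by decide)

lemma before_pos {sep : List Char} {c : Char} {r : List Char}
    (hp : sep.isPrefixOf (c :: r) = true) : before sep (c :: r) = [] := by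
  rw [before_cons, hp]; simp

lemma before_neg {sep : List Char} {c : Char} {r : List Char}
    (hp : sep.isPrefixOf (c :: r) = false) : before sep (c :: r) = c :: before sep r := by
  rw [before_cons, hp]; simp

lemma bNL_newline (r : List Char) : before NLl ('\n' :: r) = [] :=
  before_pos (by rw [NL_prefix_iff]; simp)

lemma bNL_cons {c : Char} (hc : c ≠ '\n') (r : List Char) :
    before NLl (c :: r) = c :: before NLl r :=
  before_neg (by rw [NL_prefix_iff]; simp [Ne.symm hc])

lemma crux (s : List Char) :
    before EMl (before NLl s) = before NLl (before EMl s) := by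
  induction s with
  | nil => rfl
  | cons c r ih =>
    by_cases hp : EMl.isPrefixOf (c :: r)
    · have hpre : EMl <+: (c :: r) := List.isPrefixOf_iff_prefix.mp hp
      have hcne : c ≠ '\n' := head_ne_newline hpre
      have h2 : before NLl (c :: r) = c :: before NLl r := bNL_cons hcne r
      have h3 : EMl <+: (c :: before NLl r) := by
        have := prefix_before_NL newline_not_mem_EMl hpre
        rwa [h2] at this
      rw [h2, before_pos (List.isPrefixOf_iff_prefix.mpr h3), before_pos hp]
      rfl
    · have hp' : EMl.isPrefixOf (c :: r) = false := bool_false_of_not hp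
      by_cases hc : c = '\n'
      · subst hc
        rw [bNL_newline, before_neg hp', bNL_newline]
        rfl
      · rw [bNL_cons hc r]
        have hnp2 : EMl.isPrefixOf (c :: before NLl r) = false := by
          apply prefix_false
          intro hpre2
          have hsub : (c :: before NLl r) <+: (c :: r) :=
            List.cons_prefix_cons.mpr ⟨rfl, before_prefix _ _⟩
          exact hp (List.isPrefixOf_iff_prefix.mpr (hpre2.trans hsub))
        rw [before_neg hnp2, before_neg hp', bNL_cons hc, ih]

lemma isspace_head_not_prefix {c : Char} (hw : PySem.Chars.isspace c = true) (r : List Char) :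
    EMl.isPrefixOf (c :: r) = false := by
  apply prefix_false
  intro h'
  obtain ⟨t, ht⟩ := h'
  have hE : EMl = 'E' :: "rror generating video:".toList := by decide
  rw [hE] at ht
  simp only [List.cons_append, List.cons.injEq] at ht
  rw [← ht.1] at hw
  exact absurd hw (by decide)

lemma EM_len : EMl.length = 23 := by decide

lemma h22lt : 22 < EMl.length := by decide

lemma EM_last_not_space : PySem.Chars.isspace (EMl[22]'h22lt) = false := by decide

lemma straddle {w : List Char} (hw : ∀ x ∈ w, PySem.Chars.isspace x = true) (y : List Char) :
    EMl <+: (y ++ w) ↔ EMl <+: y := by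
  constructor
  · intro h
    by_cases hy : EMl.length ≤ y.length
    · rw [List.prefix_iff_eq_take] at h ⊢
      rwa [List.take_append_of_le_length hy] at h
    · exfalso
      push_neg at hy
      have hylen : y.length ≤ 22 := by have := EM_len; omega
      have hLL : EMl.length ≤ (y ++ w).length := h.length_le
      have hlt : 22 < (y ++ w).length := by have := EM_len; omega
      have he : EMl[22]'h22lt = (y ++ w)[22]'hlt := h.getElem h22lt
      have hmem : (y ++ w)[22]'hlt ∈ w := by
        rw [List.getElem_append_right hylen]
        exact List.getElem_mem _
      have hws := hw _ hmem
      rw [← he, EM_last_not_space] at hws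
      exact Bool.false_ne_true hws
  · intro h
    exact h.trans (List.prefix_append y w)

lemma before_EM_allws {w : List Char} (hw : ∀ x ∈ w, PySem.Chars.isspace x = true) :
    before EMl w = w := by
  induction w with
  | nil => rfl
  | cons c r ih =>
    rw [before_neg (isspace_head_not_prefix (hw c (by simp)) r)]
    rw [ih (fun x hx => hw x (List.mem_cons_of_mem _ hx))]

lemma strip_append_ws {w : List Char} (hw : ∀ x ∈ w, PySem.Chars.isspace x = true)
    (v : List Char) : PySem.Chars.strip (v ++ w) = PySem.Chars.strip v := by
  have hwrev : List.dropWhile PySem.Chars.isspace w.reverse = [] := by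
    rw [List.dropWhile_eq_nil_iff]
    intro x hx
    exact hw x (List.mem_reverse.mp hx)
  simp only [PySem.Chars.strip, PySem.Chars.lstrip, PySem.Chars.rstrip]
  rw [List.dropWhile_append]
  by_cases he : (List.dropWhile PySem.Chars.isspace v).isEmpty
  · rw [if_pos he]
    have hwnil : List.dropWhile PySem.Chars.isspace w = [] := by
      rw [List.dropWhile_eq_nil_iff]; exact hw
    have hv : List.dropWhile PySem.Chars.isspace v = [] := List.isEmpty_iff.mp he
    rw [hwnil, hv]
  · rw [if_neg he]
    rw [List.reverse_append, List.dropWhile_append, hwrev]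
    simp

lemma before_NL_allws {w : List Char} (hw : ∀ x ∈ w, PySem.Chars.isspace x = true) :
    ∀ x ∈ before NLl w, PySem.Chars.isspace x = true := by
  intro x hx
  exact hw x ((before_prefix NLl w).subset hx)

lemma ws_tail_lemma {w : List Char} (hw : ∀ x ∈ w, PySem.Chars.isspace x = true) (y : List Char) :
    ∃ w', (∀ x ∈ w', PySem.Chars.isspace x = true) ∧
      before NLl (before EMl (y ++ w)) = before NLl (before EMl y) ++ w' := by
  induction y with
  | nil =>
    refine ⟨before NLl w, before_NL_allws hw, ?_⟩
    rw [List.nil_append, before_EM_allws hw]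
    rfl
  | cons c y' ih =>
    by_cases hp : EMl.isPrefixOf (c :: y')
    · have hp2 : EMl.isPrefixOf (c :: (y' ++ w)) := by
        have h1 : EMl <+: ((c :: y') ++ w) :=
          (straddle hw (c :: y')).mpr (List.isPrefixOf_iff_prefix.mp hp)
        rw [List.cons_append] at h1
        exact List.isPrefixOf_iff_prefix.mpr h1
      refine ⟨[], by simp, ?_⟩
      rw [List.cons_append, before_pos hp2, before_pos hp]
      rfl
    · have hp2 : EMl.isPrefixOf (c :: (y' ++ w)) = false := by
        apply prefix_false
        intro h'
        apply hp
        have h1 : EMl <+: ((c :: y') ++ w) := by rw [List.cons_append]; exact h'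
        exact List.isPrefixOf_iff_prefix.mpr ((straddle hw (c :: y')).mp h1)
      have hp' : EMl.isPrefixOf (c :: y') = false := bool_false_of_not hp
      by_cases hc : c = '\n'
      · subst hc
        refine ⟨[], by simp, ?_⟩
        rw [List.cons_append, before_neg hp2, before_neg hp', bNL_newline, bNL_newline]
        rfl
      · obtain ⟨w', hws, heq⟩ := ih
        refine ⟨w', hws, ?_⟩
        rw [List.cons_append, before_neg hp2, before_neg hp', bNL_cons hc, bNL_cons hc,
            heq, List.cons_append]

lemma canon_cons (c : Char) (r : List Char) :
    canon (c :: r) = if EMl.isPrefixOf (c :: r) then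
      some (PySem.Chars.strip (before NLl (before EMl (List.drop EMl.length (c :: r)))))
    else canon r := rfl

lemma canon_pos {c : Char} {r : List Char} (hp : EMl.isPrefixOf (c :: r) = true) :
    canon (c :: r)
      = some (PySem.Chars.strip (before NLl (before EMl (List.drop EMl.length (c :: r))))) := by
  rw [canon_cons, hp]; simp

lemma canon_neg {c : Char} {r : List Char} (hp : EMl.isPrefixOf (c :: r) = false) :
    canon (c :: r) = canon r := by
  rw [canon_cons, hp]; simp

lemma canon_allws {w : List Char} (hw : ∀ x ∈ w, PySem.Chars.isspace x = true) :
    canon w = none := by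
  induction w with
  | nil => rfl
  | cons c r ih =>
    rw [canon_neg (isspace_head_not_prefix (hw c (by simp)) r)]
    exact ih (fun x hx => hw x (List.mem_cons_of_mem _ hx))

lemma canon_append_ws {w : List Char} (hw : ∀ x ∈ w, PySem.Chars.isspace x = true)
    (y : List Char) : canon (y ++ w) = canon y := by
  induction y with
  | nil => rw [List.nil_append, canon_allws hw]; rfl
  | cons c y' ih =>
    by_cases hp : EMl.isPrefixOf (c :: y')
    · have hp2 : EMl.isPrefixOf (c :: (y' ++ w)) := by
        have h1 : EMl <+: ((c :: y') ++ w) :=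
          (straddle hw (c :: y')).mpr (List.isPrefixOf_iff_prefix.mp hp)
        rw [List.cons_append] at h1
        exact List.isPrefixOf_iff_prefix.mpr h1
      rw [List.cons_append, canon_pos hp2, canon_pos hp]
      have hmle : EMl.length ≤ (c :: y').length :=
        (List.isPrefixOf_iff_prefix.mp hp).length_le
      have hdrop : List.drop EMl.length (c :: (y' ++ w))
          = List.drop EMl.length (c :: y') ++ w := by
        rw [← List.cons_append, List.drop_append_of_le_length hmle]
      rw [hdrop]
      obtain ⟨w', hws, heq⟩ := ws_tail_lemma hw (List.drop EMl.length (c :: y'))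
      rw [heq, strip_append_ws hws]
    · have hp2 : EMl.isPrefixOf (c :: (y' ++ w)) = false := by
        apply prefix_false
        intro h'
        apply hp
        have h1 : EMl <+: ((c :: y') ++ w) := by rw [List.cons_append]; exact h'
        exact List.isPrefixOf_iff_prefix.mpr ((straddle hw (c :: y')).mp h1)
      rw [List.cons_append, canon_neg hp2, ih, canon_neg (bool_false_of_not hp)]

lemma canon_lstrip (l : List Char) : canon (PySem.Chars.lstrip l) = canon l := by
  induction l with
  | nil => rfl
  | cons c r ih =>
    cases hsp : PySem.Chars.isspace c with
    | true =>
      have h1 : PySem.Chars.lstrip (c :: r) = PySem.Chars.lstrip r := by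
        simp [PySem.Chars.lstrip, List.dropWhile, hsp]
      rw [h1, ih, canon_neg (isspace_head_not_prefix hsp r)]
    | false =>
      have h1 : PySem.Chars.lstrip (c :: r) = c :: r := by
        simp [PySem.Chars.lstrip, List.dropWhile, hsp]
      rw [h1]

lemma canon_rstrip (u : List Char) : canon (PySem.Chars.rstrip u) = canon u := by
  have hdecomp : u = PySem.Chars.rstrip u ++ (List.takeWhile PySem.Chars.isspace u.reverse).reverse := by
    simp only [PySem.Chars.rstrip]
    conv_lhs => rw [← u.reverse_reverse]
    conv_lhs => rw [← List.takeWhile_append_dropWhile (p := PySem.Chars.isspace) (l := u.reverse)]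
    rw [List.reverse_append]
  have hws : ∀ x ∈ (List.takeWhile PySem.Chars.isspace u.reverse).reverse,
      PySem.Chars.isspace x = true := by
    intro x hx
    exact List.mem_takeWhile_imp (List.mem_reverse.mp hx)
  conv_rhs => rw [hdecomp]
  rw [canon_append_ws hws]

lemma canon_strip (l : List Char) : canon (PySem.Chars.strip l) = canon l := by
  simp only [PySem.Chars.strip]
  rw [canon_rstrip, canon_lstrip]

lemma isIn_EM_nil : PySem.Chars.isIn EMl [] = false := by decide

lemma loopC_nil : loopC [] = none := rfl

lemma loopC_cons (h : List Char) (t : List (List Char)) :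
    loopC (h :: t) = if PySem.Chars.isIn EMl h then
      some (PySem.Chars.strip ((PySem.Chars.splitOn h EMl).getD 1 []))
    else loopC t := rfl

lemma loopC_eq_canon (l : List Char) : loopC (sp NLl l) = canon l := by
  induction l with
  | nil =>
    rw [sp_nil, loopC_cons, isIn_EM_nil]
    simp [loopC_nil, canon]
  | cons c r ih =>
    by_cases hp : EMl.isPrefixOf (c :: r)
    · have hpre : EMl <+: (c :: r) := List.isPrefixOf_iff_prefix.mp hp
      obtain ⟨t, ht⟩ := hpre
      cases hsp : sp NLl (c :: r) with
      | nil => exact absurd hsp (sp_ne_nil NLl _)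
      | cons hd tl =>
        have hhd : hd = before NLl (c :: r) := by
          have := sp_headI NL_ne (c :: r)
          rw [hsp] at this; simpa using this
        have hEMhd : EMl <+: hd := by
          rw [hhd]; exact prefix_before_NL newline_not_mem_EMl ⟨t, ht⟩
        rw [loopC_cons, if_pos ((PySem.Chars.isIn_iff_infix EMl hd).mpr hEMhd.isInfix)]
        rw [splitOn_eq_sp EM_ne, sp_getD1_pos EM_ne hEMhd]
        rw [canon_pos hp]
        rw [hhd, ← ht, before_NL_append newline_not_mem_EMl, List.drop_left, List.drop_left,
            crux t]
    · have hstep : loopC (sp NLl (c :: r)) = loopC (sp NLl r) := by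
        by_cases hc : c = '\n'
        · subst hc
          rw [sp_pos NL_ne (by rw [NL_prefix_iff]; simp)]
          have hdr : List.drop NLl.length ('\n' :: r) = r := by
            simp [NLl]
          rw [hdr, loopC_cons, isIn_EM_nil]
          simp
        · rw [sp_neg (by rw [NL_prefix_iff]; simp [Ne.symm hc])]
          cases hsp : sp NLl r with
          | nil => exact absurd hsp (sp_ne_nil NLl _)
          | cons h0 t0 =>
            have hh0 : h0 = before NLl r := by
              have := sp_headI NL_ne r
              rw [hsp] at this; simpa using this
            have hnp : ¬ EMl <+: (c :: h0) := by
              intro hcon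
              have hsub : (c :: h0) <+: (c :: r) := by
                rw [hh0]; exact List.cons_prefix_cons.mpr ⟨rfl, before_prefix _ _⟩
              exact hp (List.isPrefixOf_iff_prefix.mpr (hcon.trans hsub))
            have hiff : PySem.Chars.isIn EMl (c :: h0) = PySem.Chars.isIn EMl h0 := by
              cases h' : PySem.Chars.isIn EMl h0 with
              | true =>
                have := (PySem.Chars.isIn_iff_infix EMl h0).mp h'
                exact (PySem.Chars.isIn_iff_infix EMl (c :: h0)).mpr
                  (List.infix_cons_iff.mpr (Or.inr this))
              | false =>
                apply bool_false_of_not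
                intro h''
                have hin := (PySem.Chars.isIn_iff_infix EMl (c :: h0)).mp h''
                rcases List.infix_cons_iff.mp hin with hl | hr
                · exact hnp hl
                · rw [(PySem.Chars.isIn_iff_infix EMl h0).mpr hr] at h'
                  exact Bool.true_eq_false.mp h'
            simp only [List.modifyHead]
            rw [loopC_cons, loopC_cons, hiff]
            cases hin : PySem.Chars.isIn EMl h0 with
            | false => simp
            | true =>
              simp only [if_true]
              congr 2
              rw [splitOn_eq_sp EM_ne, splitOn_eq_sp EM_ne]
              exact sp_getD1_neg (prefix_false hnp)
      rw [hstep, ih, canon_neg (bool_false_of_not hp)]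

lemma canon_eq_B {ts : List Char} (h : 2 ≤ (sp EMl ts).length) :
    some (PySem.Chars.strip (before NLl ((sp EMl ts).getD 1 []))) = canon ts := by
  induction ts with
  | nil => rw [sp_nil] at h; simp at h
  | cons c r ih =>
    by_cases hp : EMl.isPrefixOf (c :: r)
    · rw [sp_getD1_pos EM_ne (List.isPrefixOf_iff_prefix.mp hp), canon_pos hp]
    · have hp' : EMl.isPrefixOf (c :: r) = false := bool_false_of_not hp
      rw [sp_getD1_neg hp', canon_neg hp']
      apply ih
      rw [sp_neg hp', List.length_modifyHead] at h
      exact h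

-- ===== Str → Chars bridging =====

lemma getD_map_ofList (l : List (List Char)) (n : Nat) :
    (l.map String.ofList).getD n "" = String.ofList (l.getD n []) := by
  induction l generalizing n with
  | nil => cases n <;> rfl
  | cons h t ih => cases n with
    | zero => rfl
    | succ n => simpa using ih n

lemma split?_getD (s sep : String) (hsep : sep.toList ≠ []) :
    (PySem.Str.split? s sep).getD []
      = (PySem.Chars.splitOn s.toList sep.toList).map String.ofList := by
  simp [PySem.Str.split?, PySem.Chars.split?, List.isEmpty_iff, hsep]

lemma splitTR_getD (s : String) :
    (PySem.Str.split? s "Tool Results:").getD []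
      = (PySem.Chars.splitOn s.toList TRl).map String.ofList :=
  split?_getD s "Tool Results:" (by decide)

lemma splitEM_getD (s : String) :
    (PySem.Str.split? s "Error generating video:").getD []
      = (PySem.Chars.splitOn s.toList EMl).map String.ofList :=
  split?_getD s "Error generating video:" (by decide)

lemma splitNL_getD (s : String) :
    (PySem.Str.split? s "\n").getD []
      = (PySem.Chars.splitOn s.toList NLl).map String.ofList :=
  split?_getD s "\n" (by decide)

lemma isInTR (s : String) :
    PySem.Str.isIn "Tool Results:" s = PySem.Chars.isIn TRl s.toList := rfl

lemma isInEM (s : String) :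
    PySem.Str.isIn "Error generating video:" s = PySem.Chars.isIn EMl s.toList := rfl

lemma strip_ofList (x : List Char) :
    PySem.Str.strip (String.ofList x) = String.ofList (PySem.Chars.strip x) := by
  simp [PySem.Str.strip]

lemma pyLoop_map (ls : List (List Char)) :
    pyLoop (ls.map String.ofList) = (loopC ls).map String.ofList := by
  induction ls with
  | nil => rfl
  | cons h t ih =>
    show (if PySem.Str.isIn "Error generating video:" (String.ofList h) then _ else _) = _
    rw [isInEM, String.toList_ofList, loopC_cons]
    cases hin : PySem.Chars.isIn EMl h with
    | false => simpa using ih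
    | true =>
      simp only [if_true]
      rw [splitEM_getD, String.toList_ofList, getD_map_ofList, strip_ofList]
      rfl

-- ===== VERDICT (by name: the statement is the Claim_ definition above) =====
theorem extract_tool_error_py_spec : Claim_equal_extract_tool_error_py := by
  intro content _
  show extract_tool_error_py content = extract_tool_error_py_alt content
  simp only [extract_tool_error_py, extract_tool_error_py_alt, splitTR_getD, splitEM_getD,
    splitNL_getD, getD_map_ofList, isInTR, isInEM, String.toList_ofList, strip_ofList,
    pyLoop_map, List.length_map]
  simp only [splitOn_eq_sp TR_ne, splitOn_eq_sp EM_ne, splitOn_eq_sp NL_ne]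
  by_cases h1 : PySem.Chars.isIn TRl content.toList = true
  · have h1' : 2 ≤ (sp TRl content.toList).length :=
      (sp_two_le_iff TR_ne content.toList).mpr
        ((PySem.Chars.isIn_iff_infix TRl content.toList).mp h1)
    rw [if_pos h1]
    rw [if_neg (show ¬ ((sp TRl content.toList).length < 2) from by omega)]
    by_cases h2 : PySem.Chars.isIn EMl ((sp TRl content.toList).getD 1 []) = true
    · have h2' : 2 ≤ (sp EMl ((sp TRl content.toList).getD 1 [])).length :=
        (sp_two_le_iff EM_ne _).mpr ((PySem.Chars.isIn_iff_infix EMl _).mp h2)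
      rw [if_pos h2]
      rw [if_neg (show ¬ ((sp EMl ((sp TRl content.toList).getD 1 [])).length < 2) from by omega)]
      rw [loopC_eq_canon, canon_strip]
      rw [sp_getD0 NL_ne, ← canon_eq_B h2']
      rfl
    · have h2'' : (sp EMl ((sp TRl content.toList).getD 1 [])).length < 2 := by
        by_contra hcon
        push_neg at hcon
        exact h2 ((PySem.Chars.isIn_iff_infix EMl _).mpr ((sp_two_le_iff EM_ne _).mp hcon))
      rw [if_neg h2, if_pos h2'']
  · have h1'' : (sp TRl content.toList).length < 2 := by
      by_contra hcon
      push_neg at hcon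
      exact h1 ((PySem.Chars.isIn_iff_infix TRl _).mpr ((sp_two_le_iff TR_ne _).mp hcon))
    rw [if_neg h1, if_pos h1'']
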